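-- pv_equiv track=rewrite | github.com/Kjoon97/Algorithm | boj/IT/비밀번호 발음하기.py | count_z
-- ===== SOURCE A (Python) =====
-- def count_z(str):
--     cnt=0
--     for c in str:
--         if cnt>=3:
--             return cnt
--         if c not in ['a','e','i','o','u']:
--             cnt+=1
--         else:
--             cnt=0
--
--     return cnt
-- ===== SOURCE B (Python) =====
-- def count_z(str):
--     # Run-based scan: measure each maximal consonant run, cap at 3, hop over the vowel.
--     s = str
--     while s:
--         run = 0
--         for c in s:
--             if c in "aeiou":
--                 break
--             run += 1
--         if run >= 3:
--             return 3
--         if run == len(s):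
--             return run
--         s = s[run + 1:]
--     return 0
-- ===== Notes on version B (the rewrite author's own statement) =====
-- stated objective: alternative
-- what changed: Replaces the per-character running counter with a run-based scan: an inner loop measures each maximal consonant run, returns 3 as soon as a run reaches 3, returns the run length if it ends the string, and otherwise hops over the separating vowel.
import Mathlib
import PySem

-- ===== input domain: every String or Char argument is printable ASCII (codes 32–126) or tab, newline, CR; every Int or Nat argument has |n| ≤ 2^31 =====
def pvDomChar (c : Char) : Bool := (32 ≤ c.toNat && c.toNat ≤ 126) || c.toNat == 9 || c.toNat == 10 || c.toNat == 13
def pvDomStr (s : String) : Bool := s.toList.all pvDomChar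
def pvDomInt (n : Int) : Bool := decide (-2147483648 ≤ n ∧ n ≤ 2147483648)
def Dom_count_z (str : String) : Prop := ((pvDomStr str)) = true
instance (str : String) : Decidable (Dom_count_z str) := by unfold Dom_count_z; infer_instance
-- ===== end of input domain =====

-- B replaces A's running counter with a run-based scan (inner loop per maximal consonant run); same cost, different decomposition.

-- ===== PORT A =====
-- the for-loop of A, state = cnt; early return when cnt >= 3
def czA : List Char → Int → Int
  | [], cnt => cnt
  | c :: rest, cnt =>
      if cnt ≥ 3 then cnt
      else if c ∈ (['a', 'e', 'i', 'o', 'u'] : List Char) then czA rest 0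
      else czA rest (cnt + 1)

def count_z (str : String) : Int := czA str.toList 0

-- ===== PORT B =====
-- inner 'for c in s: if c in "aeiou": break; run += 1' of B
def czRunGo : Nat → List Char → Nat
  | run, [] => run
  | run, c :: rest =>
      if c ∈ (['a', 'e', 'i', 'o', 'u'] : List Char) then run
      else czRunGo (run + 1) rest

-- outer 'while s:' loop of B
def czB (s : List Char) : Int :=
  if hs : s = [] then 0
  else
    let run := czRunGo 0 s
    if run ≥ 3 then 3
    else if run = s.length then (run : Int)
    else czB (s.drop (run + 1))
  termination_by s.length
  decreasing_by
    simp only [List.length_drop]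
    have : 0 < s.length := List.length_pos_of_ne_nil hs
    omega

def count_z_alt (str : String) : Int := czB str.toList

-- ===== PRECONDITION & SPEC =====
def Spec_count_z (str : String) (out : Int) : Prop := out = count_z_alt str
instance (str : String) (out : Int) : Decidable (Spec_count_z str out) := by unfold Spec_count_z; infer_instance

-- ===== CLAIM (what is proved, stated in full; the proofs are below) =====
def Claim_equal_count_z : Prop := ∀ (str : String), Dom_count_z str → Spec_count_z str (count_z str)

-- ===== LEMMAS AND PROOFS =====

-- structural form of the leading-consonant-run length (proof-side helper)
def czRL : List Char → Nat
  | [] => 0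
  | c :: rest =>
      if c ∈ (['a', 'e', 'i', 'o', 'u'] : List Char) then 0
      else czRL rest + 1

lemma czRunGo_eq (l : List Char) : ∀ run, czRunGo run l = run + czRL l := by
  induction l with
  | nil => intro run; simp [czRunGo, czRL]
  | cons c rest ih =>
      intro run
      by_cases h : c ∈ (['a', 'e', 'i', 'o', 'u'] : List Char)
      · simp [czRunGo, czRL, h]
      · simp [czRunGo, czRL, h, ih]
        omega

-- A's loop, described run-by-run
lemma czA_step (l : List Char) : ∀ cnt : Int, 0 ≤ cnt → cnt ≤ 3 →
    czA l cnt =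
      if cnt + (czRL l : Int) ≥ 3 then 3
      else if czRL l = l.length then cnt + (czRL l : Int)
      else czA (l.drop (czRL l + 1)) 0 := by
  induction l with
  | nil =>
      intro cnt h0 h3
      simp only [czA, czRL, List.length_nil, Nat.cast_zero, add_zero]
      by_cases h : cnt ≥ 3
      · rw [if_pos h]; omega
      · simp [if_neg h]
  | cons c rest ih =>
      intro cnt h0 h3
      by_cases hc : c ∈ (['a', 'e', 'i', 'o', 'u'] : List Char)
      · by_cases hcnt : cnt ≥ 3
        · have hcnt' : cnt = 3 := le_antisymm h3 hcnt
          simp [czA, czRL, hc, hcnt']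
        · simp only [czA, czRL, if_pos hc, if_neg hcnt]
          have hlen : (0 : Nat) ≠ (c :: rest).length := by simp
          simp only [if_neg hlen]
          have : ¬ (cnt + ((0 : Nat) : Int) ≥ 3) := by omega
          simp only [if_neg this, List.drop_succ_cons, List.drop_zero]
      · by_cases hcnt : cnt ≥ 3
        · have hcnt' : cnt = 3 := le_antisymm h3 hcnt
          have hge : cnt + ((czRL rest + 1 : Nat) : Int) ≥ 3 := by push_cast; omega
          simp only [czA, if_pos hcnt, czRL, if_neg hc, if_pos hge]
          exact hcnt'
        · simp only [czA, if_neg hcnt, if_neg hc, czRL]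
          rw [ih (cnt + 1) (by omega) (by omega)]
          have e1 : (cnt + 1 + (czRL rest : Int) ≥ 3) ↔ (cnt + ((czRL rest + 1 : Nat) : Int) ≥ 3) := by
            push_cast; omega
          have e2 : (czRL rest = rest.length) ↔ ((czRL rest + 1) = (c :: rest).length) := by
            simp
          have e3 : rest.drop (czRL rest + 1) = (c :: rest).drop (czRL rest + 1 + 1) := by
            simp [List.drop_succ_cons]
          by_cases h1 : cnt + 1 + (czRL rest : Int) ≥ 3
          · rw [if_pos h1, if_pos (e1.mp h1)]
          · rw [if_neg h1, if_neg (fun h => h1 (e1.mpr h))]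
            by_cases h2 : czRL rest = rest.length
            · rw [if_pos h2, if_pos (e2.mp h2)]
              push_cast; omega
            · rw [if_neg h2, if_neg (fun h => h2 (e2.mpr h)), e3]

lemma czA_eq_czB : ∀ n (l : List Char), l.length ≤ n → czA l 0 = czB l := by
  intro n
  induction n with
  | zero =>
      intro l hl
      have : l = [] := List.length_eq_zero_iff.mp (Nat.le_zero.mp hl)
      subst this
      simp [czA, czB]
  | succ n ih =>
      intro l hl
      by_cases hnil : l = []
      · subst hnil; simp [czA, czB]
      · rw [czB, dif_neg hnil]
        rw [czA_step l 0 (by omega) (by omega)]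
        simp only [zero_add, czRunGo_eq]
        by_cases h1 : ((czRL l : Int) ≥ 3)
        · rw [if_pos h1, if_pos (by omega : czRL l ≥ 3)]
        · rw [if_neg h1, if_neg (by omega : ¬ czRL l ≥ 3)]
          by_cases h2 : czRL l = l.length
          · rw [if_pos h2, if_pos h2]
          · rw [if_neg h2, if_neg h2]
            apply ih
            have hpos : 0 < l.length := List.length_pos_of_ne_nil hnil
            simp only [List.length_drop]
            omega

-- ===== VERDICT (by name: the statement is the Claim_ definition above) =====
theorem count_z_spec : Claim_equal_count_z := by
  intro str _
  unfold Spec_count_z count_z count_z_alt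
  exact czA_eq_czB str.toList.length str.toList le_rfl
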